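-- pv_equiv track=rewrite | github.com/sahasand/TraceScribe | backend/app/modules/documents/workflows/icf_legacy.py | _organize_adverse_events
-- ===== SOURCE A (Python) =====
-- from typing import Any, Dict, List, Optional
--
-- def _organize_adverse_events(adverse_events: list) -> Dict[str, List[str]]:
--     """
--     Organize adverse events by frequency category.
--
--     Args:
--         adverse_events: List of adverse event dictionaries
--
--     Returns:
--         Dictionary with frequency categories as keys and event lists as values
--     """
--     organized = {
--         "very_common": [],
--         "common": [],
--         "uncommon": [],
--         "rare": [],
--         "unknown": [],
--     }
--
--     for ae in adverse_events:
--         if not isinstance(ae, dict):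
--             continue
--
--         # Use plain language version if available
--         term = ae.get("plain_language") or ae.get("term", "")
--         if not term:
--             continue
--
--         # Determine frequency category
--         freq = (ae.get("frequency", "") or "").lower()
--
--         if "very common" in freq or ">10%" in freq or "10%" in freq:
--             organized["very_common"].append(term)
--         elif "common" in freq or "1-10%" in freq or "1%-10%" in freq:
--             organized["common"].append(term)
--         elif "uncommon" in freq or "<1%" in freq or "0.1%-1%" in freq:
--             organized["uncommon"].append(term)
--         elif "rare" in freq or "<0.1%" in freq:
--             organized["rare"].append(term)
--         else:
--             organized["unknown"].append(term)
--
--     return organized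
-- ===== SOURCE B (Python) =====
-- # B: staged multi-pass grouping. One pass extracts (term, freq) pairs; then each
-- # category is built by its own filter pass: events matching this category's
-- # patterns but none of the patterns of earlier categories. First-match priority
-- # is encoded in the growing 'earlier' pattern set, not in a per-event if/elif.
--
-- _CATS = [
--     ("very_common", ["very common", ">10%", "10%"]),
--     ("common", ["common", "1-10%", "1%-10%"]),
--     ("uncommon", ["uncommon", "<1%", "0.1%-1%"]),
--     ("rare", ["rare", "<0.1%"]),
-- ]
--
-- def _organize_adverse_events(adverse_events: list):
--     evs = []
--     for ae in adverse_events: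
--         if not isinstance(ae, dict):
--             continue
--         term = ae.get("plain_language") or ae.get("term", "")
--         if not term:
--             continue
--         evs.append((term, (ae.get("frequency", "") or "").lower()))
--
--     result = {}
--     earlier = []
--     for cat, pats in _CATS:
--         result[cat] = [t for t, f in evs
--                        if any(p in f for p in pats)
--                        and not any(p in f for p in earlier)]
--         earlier = earlier + pats
--     result["unknown"] = [t for t, f in evs
--                          if not any(p in f for p in earlier)]
--     return result
-- ===== Notes on version B (the rewrite author's own statement) =====
-- stated objective: alternative
-- what changed: Replaces the single-pass if/elif classification appending into a pre-initialized dict by staged passes: one extraction pass to (term, freq) pairs, then an independent filter pass per category that selects events matching that category's patterns and none of the cumulatively collected earlier-category patterns (priority via pattern-set exclusion instead of branch order).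
import Mathlib
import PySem

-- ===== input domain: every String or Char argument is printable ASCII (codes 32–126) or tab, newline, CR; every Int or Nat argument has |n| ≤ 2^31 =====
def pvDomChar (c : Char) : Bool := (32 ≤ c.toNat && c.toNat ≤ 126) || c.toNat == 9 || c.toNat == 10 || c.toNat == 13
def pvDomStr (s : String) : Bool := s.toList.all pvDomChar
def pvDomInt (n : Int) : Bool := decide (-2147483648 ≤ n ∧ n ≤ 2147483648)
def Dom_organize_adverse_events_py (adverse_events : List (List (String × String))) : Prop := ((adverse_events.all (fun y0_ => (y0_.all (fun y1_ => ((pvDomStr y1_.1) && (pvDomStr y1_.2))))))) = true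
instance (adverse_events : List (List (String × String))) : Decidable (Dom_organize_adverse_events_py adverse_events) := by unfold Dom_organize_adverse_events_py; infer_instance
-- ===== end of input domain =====

-- B replaces A's single-pass if/elif classification with staged passes: extract (term, freq)
-- pairs once, then build each category by its own filter pass that excludes the cumulatively
-- collected patterns of earlier categories (objective: alternative decomposition, same cost).

-- ===== PORT A =====
def organize_adverse_events_py (adverse_events : List (List (String × String))) : List (String × List String) :=
  let organized : PySem.Dict String (List String) :=
    PySem.Dict.ofList [("very_common", []), ("common", []), ("uncommon", []), ("rare", []), ("unknown", [])]
  (adverse_events.foldl (fun organized ae =>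
    let aed : PySem.Dict String String := PySem.Dict.mk ae
    -- term = ae.get("plain_language") or ae.get("term", "")
    let term : String :=
      match PySem.Dict.get? aed "plain_language" with
      | some s => if s = "" then PySem.Dict.getD aed "term" "" else s
      | none => PySem.Dict.getD aed "term" ""
    if term = "" then organized
    else
      -- freq = (ae.get("frequency", "") or "").lower()  ('or ""' is the identity on strings)
      let freq := PySem.Str.lower (PySem.Dict.getD aed "frequency" "")
      if PySem.Str.isIn "very common" freq || PySem.Str.isIn ">10%" freq || PySem.Str.isIn "10%" freq then
        organized.modify "very_common" [] (· ++ [term])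
      else if PySem.Str.isIn "common" freq || PySem.Str.isIn "1-10%" freq || PySem.Str.isIn "1%-10%" freq then
        organized.modify "common" [] (· ++ [term])
      else if PySem.Str.isIn "uncommon" freq || PySem.Str.isIn "<1%" freq || PySem.Str.isIn "0.1%-1%" freq then
        organized.modify "uncommon" [] (· ++ [term])
      else if PySem.Str.isIn "rare" freq || PySem.Str.isIn "<0.1%" freq then
        organized.modify "rare" [] (· ++ [term])
      else
        organized.modify "unknown" [] (· ++ [term])) organized).items

-- ===== PORT B =====
def pvCats : List (String × List String) :=
  [("very_common", ["very common", ">10%", "10%"]),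
   ("common", ["common", "1-10%", "1%-10%"]),
   ("uncommon", ["uncommon", "<1%", "0.1%-1%"]),
   ("rare", ["rare", "<0.1%"])]

def organize_adverse_events_py_alt (adverse_events : List (List (String × String))) : List (String × List String) :=
  -- extraction pass: evs = [(term, freq), …]
  let evs : List (String × String) := adverse_events.foldl (fun evs ae =>
    let aed : PySem.Dict String String := PySem.Dict.mk ae
    let term : String :=
      match PySem.Dict.get? aed "plain_language" with
      | some s => if s = "" then PySem.Dict.getD aed "term" "" else s
      | none => PySem.Dict.getD aed "term" ""
    if term = "" then evs
    else evs ++ [(term, PySem.Str.lower (PySem.Dict.getD aed "frequency" ""))]) []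
  -- one filter pass per category, excluding earlier categories' patterns
  let st := pvCats.foldl (fun (st : PySem.Dict String (List String) × List String) cp =>
    (st.1.insert cp.1
       ((evs.filter (fun tf =>
          cp.2.any (fun p => PySem.Str.isIn p tf.2) &&
          !(st.2.any (fun p => PySem.Str.isIn p tf.2)))).map Prod.fst),
     st.2 ++ cp.2)) (PySem.Dict.mk [], [])
  (st.1.insert "unknown"
     ((evs.filter (fun tf => !(st.2.any (fun p => PySem.Str.isIn p tf.2)))).map Prod.fst)).items

-- ===== PRECONDITION & SPEC =====
def Spec_organize_adverse_events_py (adverse_events : List (List (String × String))) (out : List (String × List String)) : Prop := out = organize_adverse_events_py_alt adverse_events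
instance (adverse_events : List (List (String × String))) (out : List (String × List String)) : Decidable (Spec_organize_adverse_events_py adverse_events out) := by unfold Spec_organize_adverse_events_py; infer_instance

-- ===== CLAIM =====
def Claim_equal_organize_adverse_events_py : Prop := ∀ (adverse_events : List (List (String × String))), Dom_organize_adverse_events_py adverse_events → Spec_organize_adverse_events_py adverse_events (organize_adverse_events_py adverse_events)

-- ===== LEMMAS AND PROOFS =====

-- the term / lowered frequency extracted from one event (both Python sources verbatim)
def pvTerm (ae : List (String × String)) : String :=
  match PySem.Dict.get? (PySem.Dict.mk ae) "plain_language" with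
  | some s => if s = "" then PySem.Dict.getD (PySem.Dict.mk ae) "term" "" else s
  | none => PySem.Dict.getD (PySem.Dict.mk ae) "term" ""

def pvFreq (ae : List (String × String)) : String :=
  PySem.Str.lower (PySem.Dict.getD (PySem.Dict.mk ae) "frequency" "")

-- proof-side first-match classifier (used only to characterise both programs)
def pvClassify : List (String × List String) → String → String
  | [], _ => "unknown"
  | (cat, pats) :: rest, freq =>
    if pats.any (fun p => PySem.Str.isIn p freq) then cat else pvClassify rest freq

-- one event's contribution as a (term, freq) pair (B) and as a (category, term) label (proof side)
def pvEv (ae : List (String × String)) : List (String × String) :=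
  if pvTerm ae = "" then [] else [(pvTerm ae, pvFreq ae)]

def pvLab (ae : List (String × String)) : List (String × String) :=
  if pvTerm ae = "" then [] else [(pvClassify pvCats (pvFreq ae), pvTerm ae)]

def pvStepA (organized : PySem.Dict String (List String)) (ae : List (String × String)) :
    PySem.Dict String (List String) :=
  if pvTerm ae = "" then organized
  else
    if PySem.Str.isIn "very common" (pvFreq ae) || PySem.Str.isIn ">10%" (pvFreq ae) || PySem.Str.isIn "10%" (pvFreq ae) then
      organized.modify "very_common" [] (· ++ [pvTerm ae])
    else if PySem.Str.isIn "common" (pvFreq ae) || PySem.Str.isIn "1-10%" (pvFreq ae) || PySem.Str.isIn "1%-10%" (pvFreq ae) then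
      organized.modify "common" [] (· ++ [pvTerm ae])
    else if PySem.Str.isIn "uncommon" (pvFreq ae) || PySem.Str.isIn "<1%" (pvFreq ae) || PySem.Str.isIn "0.1%-1%" (pvFreq ae) then
      organized.modify "uncommon" [] (· ++ [pvTerm ae])
    else if PySem.Str.isIn "rare" (pvFreq ae) || PySem.Str.isIn "<0.1%" (pvFreq ae) then
      organized.modify "rare" [] (· ++ [pvTerm ae])
    else
      organized.modify "unknown" [] (· ++ [pvTerm ae])

def pvD5 (va vb vc vr vu : List String) : PySem.Dict String (List String) :=
  PySem.Dict.mk [("very_common", va), ("common", vb), ("uncommon", vc), ("rare", vr), ("unknown", vu)]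

def pvSel (cat : String) (evs : List (List (String × String))) : List String :=
  ((evs.flatMap pvLab).filter (fun p => p.1 == cat)).map Prod.snd

lemma portA_eq_fold (evs : List (List (String × String))) :
    organize_adverse_events_py evs = (evs.foldl pvStepA (pvD5 [] [] [] [] [])).items := rfl

-- the first-match scan of the table, unfolded to the nested conditionals
lemma classify_table (freq : String) :
    pvClassify pvCats freq =
      if PySem.Str.isIn "very common" freq || PySem.Str.isIn ">10%" freq || PySem.Str.isIn "10%" freq then "very_common"
      else if PySem.Str.isIn "common" freq || PySem.Str.isIn "1-10%" freq || PySem.Str.isIn "1%-10%" freq then "common"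
      else if PySem.Str.isIn "uncommon" freq || PySem.Str.isIn "<1%" freq || PySem.Str.isIn "0.1%-1%" freq then "uncommon"
      else if PySem.Str.isIn "rare" freq || PySem.Str.isIn "<0.1%" freq then "rare"
      else "unknown" := by
  simp only [pvCats, pvClassify, List.any_cons, List.any_nil, Bool.or_false, Bool.or_assoc]

-- A's chosen branch is exactly the first-match classification
lemma stepA_eq_modify (d : PySem.Dict String (List String)) (ae : List (String × String))
    (h : pvTerm ae ≠ "") :
    pvStepA d ae = d.modify (pvClassify pvCats (pvFreq ae)) [] (· ++ [pvTerm ae]) := by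
  rw [classify_table, pvStepA, if_neg h]
  split_ifs <;> rfl

lemma classify_cases (freq : String) :
    pvClassify pvCats freq = "very_common" ∨ pvClassify pvCats freq = "common" ∨
    pvClassify pvCats freq = "uncommon" ∨ pvClassify pvCats freq = "rare" ∨
    pvClassify pvCats freq = "unknown" := by
  rw [classify_table]
  split_ifs <;> tauto

lemma modify_D5 (va vb vc vr vu : List String) (c : String) (f : List String → List String)
    (hc : c = "very_common" ∨ c = "common" ∨ c = "uncommon" ∨ c = "rare" ∨ c = "unknown") :
    (pvD5 va vb vc vr vu).modify c [] f =
      pvD5 (if c = "very_common" then f va else va) (if c = "common" then f vb else vb)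
           (if c = "uncommon" then f vc else vc) (if c = "rare" then f vr else vr)
           (if c = "unknown" then f vu else vu) := by
  rcases hc with h | h | h | h | h <;> subst h <;> rfl

lemma sel_cons (cat : String) (ae : List (String × String)) (evs : List (List (String × String))) :
    pvSel cat (ae :: evs) =
      ((pvLab ae).filter (fun p => p.1 == cat)).map Prod.snd ++ pvSel cat evs := by
  simp [pvSel, List.flatMap_cons, List.filter_append]

lemma main_lemma (evs : List (List (String × String))) (va vb vc vr vu : List String) :
    (evs.foldl pvStepA (pvD5 va vb vc vr vu)).items =
      [("very_common", va ++ pvSel "very_common" evs), ("common", vb ++ pvSel "common" evs),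
       ("uncommon", vc ++ pvSel "uncommon" evs), ("rare", vr ++ pvSel "rare" evs),
       ("unknown", vu ++ pvSel "unknown" evs)] := by
  induction evs generalizing va vb vc vr vu with
  | nil => simp [pvSel, pvD5]
  | cons ae evs ih =>
    by_cases h : pvTerm ae = ""
    · have hlab : pvLab ae = [] := by simp [pvLab, h]
      simp only [List.foldl_cons, pvStepA, if_pos h, ih, sel_cons, hlab,
        List.filter_nil, List.map_nil, List.nil_append]
    · have hc := classify_cases (pvFreq ae)
      have hlab : pvLab ae = [(pvClassify pvCats (pvFreq ae), pvTerm ae)] := by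
        simp [pvLab, h]
      rw [List.foldl_cons, stepA_eq_modify _ _ h, modify_D5 _ _ _ _ _ _ _ hc, ih]
      rcases hc with h' | h' | h' | h' | h' <;>
        simp [sel_cons, hlab, h', List.append_assoc]

-- B's extraction foldl builds exactly the flatMap of per-event (term, freq) pairs
lemma events_eq_flatMap (evs : List (List (String × String))) (acc : List (String × String)) :
    (evs.foldl (fun evs ae =>
      let aed : PySem.Dict String String := PySem.Dict.mk ae
      let term : String :=
        match PySem.Dict.get? aed "plain_language" with
        | some s => if s = "" then PySem.Dict.getD aed "term" "" else s
        | none => PySem.Dict.getD aed "term" ""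
      if term = "" then evs
      else evs ++ [(term, PySem.Str.lower (PySem.Dict.getD aed "frequency" ""))]) acc) =
    acc ++ evs.flatMap pvEv := by
  induction evs generalizing acc with
  | nil => simp
  | cons ae evs ih =>
    rw [List.foldl_cons, ih, List.flatMap_cons, ← List.append_assoc]
    congr 1
    show (if pvTerm ae = "" then acc
          else acc ++ [(pvTerm ae, pvFreq ae)]) = acc ++ pvEv ae
    rw [pvEv]
    split_ifs <;> simp

-- a category filter over the (term, freq) pairs equals the label-based selection,
-- whenever the filter condition coincides with "classified into cat"
lemma filter_eq_sel (cond : String → Bool) (cat : String)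
    (h : ∀ f, cond f = (pvClassify pvCats f == cat)) (evs : List (List (String × String))) :
    ((evs.flatMap pvEv).filter (fun tf => cond tf.2)).map Prod.fst = pvSel cat evs := by
  induction evs with
  | nil => simp [pvSel]
  | cons ae evs ih =>
    rw [List.flatMap_cons, List.filter_append, List.map_append, ih, sel_cons]
    congr 1
    by_cases hT : pvTerm ae = ""
    · simp [pvEv, pvLab, hT]
    · simp [pvEv, pvLab, hT, h]
      by_cases hcl : pvClassify pvCats (pvFreq ae) == cat <;> simp [hcl]

-- the five filter conditions of port B coincide with the classification
lemma cond_vc (f : String) :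
    (["very common", ">10%", "10%"].any (fun p => PySem.Str.isIn p f) && !(([] : List String).any (fun p => PySem.Str.isIn p f)))
      = (pvClassify pvCats f == "very_common") := by
  rw [classify_table]
  simp only [List.any_cons, List.any_nil, Bool.or_false, Bool.or_assoc]
  split_ifs with h1 h2 h3 h4 <;> simp_all

lemma cond_c (f : String) :
    (["common", "1-10%", "1%-10%"].any (fun p => PySem.Str.isIn p f) &&
     !((["very common", ">10%", "10%"] : List String).any (fun p => PySem.Str.isIn p f)))
      = (pvClassify pvCats f == "common") := by
  rw [classify_table]
  simp only [List.any_cons, List.any_nil, Bool.or_false, Bool.or_assoc]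
  split_ifs with h1 h2 h3 h4 <;> simp_all <;> intros <;> simp_all

lemma cond_u (f : String) :
    (["uncommon", "<1%", "0.1%-1%"].any (fun p => PySem.Str.isIn p f) &&
     !((["very common", ">10%", "10%", "common", "1-10%", "1%-10%"] : List String).any (fun p => PySem.Str.isIn p f)))
      = (pvClassify pvCats f == "uncommon") := by
  rw [classify_table]
  simp only [List.any_cons, List.any_nil, Bool.or_false, Bool.or_assoc]
  split_ifs with h1 h2 h3 h4 <;> simp_all <;> intros <;> simp_all

lemma cond_r (f : String) :
    (["rare", "<0.1%"].any (fun p => PySem.Str.isIn p f) &&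
     !((["very common", ">10%", "10%", "common", "1-10%", "1%-10%", "uncommon", "<1%", "0.1%-1%"] : List String).any (fun p => PySem.Str.isIn p f)))
      = (pvClassify pvCats f == "rare") := by
  rw [classify_table]
  simp only [List.any_cons, List.any_nil, Bool.or_false, Bool.or_assoc]
  split_ifs with h1 h2 h3 h4 <;> simp_all <;> intros <;> simp_all

lemma cond_unk (f : String) :
    (!((["very common", ">10%", "10%", "common", "1-10%", "1%-10%", "uncommon", "<1%", "0.1%-1%", "rare", "<0.1%"] : List String).any (fun p => PySem.Str.isIn p f)))
      = (pvClassify pvCats f == "unknown") := by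
  rw [classify_table]
  simp only [List.any_cons, List.any_nil, Bool.or_false, Bool.or_assoc]
  split_ifs with h1 h2 h3 h4 <;> simp_all <;> intros <;> simp_all

-- port B, with its category-table foldl executed (the table is a literal)
lemma portB_eq (evs : List (List (String × String))) :
    organize_adverse_events_py_alt evs =
      [("very_common", pvSel "very_common" evs), ("common", pvSel "common" evs),
       ("uncommon", pvSel "uncommon" evs), ("rare", pvSel "rare" evs),
       ("unknown", pvSel "unknown" evs)] := by
  unfold organize_adverse_events_py_alt
  rw [events_eq_flatMap]
  simp only [pvCats, List.foldl_cons, List.foldl_nil, List.nil_append, List.cons_append]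
  show [("very_common", _), ("common", _), ("uncommon", _), ("rare", _), ("unknown", _)] = _
  rw [filter_eq_sel _ _ cond_vc, filter_eq_sel _ _ cond_c, filter_eq_sel _ _ cond_u,
      filter_eq_sel _ _ cond_r, filter_eq_sel _ _ cond_unk]

-- ===== VERDICT =====
theorem organize_adverse_events_py_spec : Claim_equal_organize_adverse_events_py := by
  intro evs _
  unfold Spec_organize_adverse_events_py
  rw [portA_eq_fold, main_lemma, portB_eq]
  simp
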